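-- pv_equiv track=rewrite | github.com/jebaraj-j/FInal-Year-Project | voice_assistant/speech/voice_listener.py | _remove_suffix_echo
-- ===== SOURCE A (Python) =====
-- def _remove_suffix_echo(tok: str) -> str:
--     """Remove VOSK suffix-echo artifacts.
--     Handles: 'chromerome'->'chrome', 'shutdowndown'->'shutdown', 'zoomzoom'->'zoom'.
--     """
--     n = len(tok)
--     # Try every tail length from 3 up to len//2
--     for tail_len in range(3, n // 2 + 1):
--         tail = tok[n - tail_len:]
--         base = tok[:n - tail_len]
--         if base and base.endswith(tail):
--             return base
--     return tok
-- ===== SOURCE B (Python) =====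
-- def _remove_suffix_echo(tok: str) -> str:
--     n = len(tok)
--     r = tok[::-1]
--     # Z-array of the reversed token: z[i] = length of the longest common
--     # prefix of r and r[i:], computed in O(n) with the standard [l, rt) window.
--     z = [0] * n
--     l = rt = 0
--     for i in range(1, n):
--         k = min(rt - i, z[i - l]) if i < rt else 0
--         while i + k < n and r[k] == r[i + k]:
--             k += 1
--         z[i] = k
--         if i + k > rt:
--             l, rt = i, i + k
--     # tok ends with a doubled tail of length t  iff  z[t] >= t on the reversal.
--     for t in range(3, n // 2 + 1):
--         if z[t] >= t:
--             return tok[:n - t]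
--     return tok
-- ===== Notes on version B (the rewrite author's own statement) =====
-- stated objective: faster
-- what changed: Replaces A's per-candidate-length suffix comparison (a fresh slice and endswith test for every tail length) by a single O(n) Z-algorithm pass over the reversed token, after which each candidate length is checked with one array lookup (z[t] >= t).
import Mathlib
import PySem

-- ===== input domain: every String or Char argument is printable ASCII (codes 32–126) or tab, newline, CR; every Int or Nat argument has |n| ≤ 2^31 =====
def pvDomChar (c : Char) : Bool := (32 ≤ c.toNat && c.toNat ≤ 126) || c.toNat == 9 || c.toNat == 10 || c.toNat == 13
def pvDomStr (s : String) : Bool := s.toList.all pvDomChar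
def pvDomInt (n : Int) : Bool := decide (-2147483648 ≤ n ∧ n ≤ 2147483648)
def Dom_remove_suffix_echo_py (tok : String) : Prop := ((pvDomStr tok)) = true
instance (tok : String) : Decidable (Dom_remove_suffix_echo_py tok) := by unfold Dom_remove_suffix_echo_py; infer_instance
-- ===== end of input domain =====

-- B replaces A's per-length slice-and-endswith scan by one O(n) Z-algorithm pass
-- over the reversed token plus an O(1) table lookup per candidate tail length.

-- ===== PORT A =====
-- the 'for tail_len in range(3, n//2+1)' loop with its early return
def pvAloop (tok : String) (n : Int) : List Int → String
  | [] => tok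
  | t :: ts =>
    let tail := PySem.Str.slice tok (some (n - t)) none
    let base := PySem.Str.slice tok none (some (n - t))
    if (!(base == "")) && PySem.Str.endswith base tail then base
    else pvAloop tok n ts

def remove_suffix_echo_py (tok : String) : String :=
  let n : Int := PySem.Str.len tok
  pvAloop tok n (PySem.List.pyRange 3 (PySem.Int.floordiv n 2 + 1) 1)

-- ===== PORT B =====
-- the 'while i + k < n and r[k] == r[i + k]: k += 1' loop of Source B
def pvZext (r : List Char) (n i k : Nat) : Nat :=
  if h : i + k < n ∧ r.getD k ' ' = r.getD (i + k) ' ' then pvZext r n i (k + 1) else k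
termination_by n - (i + k)
decreasing_by omega

-- one iteration of Source B's 'for i in range(1, n)' loop; state (z, l, rt)
def pvZstep (r : List Char) (n : Nat) (st : List Nat × Nat × Nat) (i : Nat) :
    List Nat × Nat × Nat :=
  let z := st.1
  let l := st.2.1
  let rt := st.2.2
  let k0 := if i < rt then min (rt - i) (z.getD (i - l) 0) else 0
  let k := pvZext r n i k0
  let z' := z.set i k
  if rt < i + k then (z', i, i + k) else (z', l, rt)

-- Source B's 'for t in range(3, n // 2 + 1)' loop with its early return
def pvBscan (tok : String) (n : Nat) (z : List Nat) : List Nat → String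
  | [] => tok
  | t :: ts =>
    if t ≤ z.getD t 0 then PySem.Str.slice tok none (some ((n - t : Nat) : Int))
    else pvBscan tok n z ts

def remove_suffix_echo_py_alt (tok : String) : String :=
  let cl := tok.toList
  let n := cl.length
  let r := cl.reverse
  let z := ((List.range' 1 (n - 1)).foldl (pvZstep r n) (List.replicate n 0, 0, 0)).1
  pvBscan tok n z (List.range' 3 (n / 2 + 1 - 3))

-- ===== PRECONDITION & SPEC =====
def Spec_remove_suffix_echo_py (tok : String) (out : String) : Prop := out = remove_suffix_echo_py_alt tok
instance (tok : String) (out : String) : Decidable (Spec_remove_suffix_echo_py tok out) := by unfold Spec_remove_suffix_echo_py; infer_instance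

-- ===== CLAIM (what is proved, stated in full; the proofs are below) =====
def Claim_equal_remove_suffix_echo_py : Prop := ∀ (tok : String), Dom_remove_suffix_echo_py tok → Spec_remove_suffix_echo_py tok (remove_suffix_echo_py tok)

-- ===== LEMMAS AND PROOFS =====

-- longest common prefix length of two lists
def pvLcp : List Char → List Char → Nat
  | a :: as, b :: bs => if a = b then pvLcp as bs + 1 else 0
  | _, _ => 0

-- the true Z-value: longest common prefix of r and r.drop i
def pvZf (r : List Char) (i : Nat) : Nat := pvLcp r (r.drop i)

theorem pvLcp_le_right : ∀ (a b : List Char), pvLcp a b ≤ b.length := by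
  intro a
  induction a with
  | nil => intro b; cases b <;> simp [pvLcp]
  | cons x as ih =>
    intro b
    cases b with
    | nil => simp [pvLcp]
    | cons y bs =>
      simp only [pvLcp]
      split
      · simpa using ih bs
      · simp

theorem pvLcp_getElem? {a b : List Char} {j : Nat} (h : j < pvLcp a b) :
    a[j]? = b[j]? := by
  induction a generalizing b j with
  | nil => cases b <;> simp [pvLcp] at h
  | cons x as ih =>
    cases b with
    | nil => simp [pvLcp] at h
    | cons y bs =>
      simp only [pvLcp] at h
      split at h
      · cases j with
        | zero => simp_all
        | succ j' => simpa using ih (by omega)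
      · omega

theorem pvLcp_stop {a b : List Char} (h1 : pvLcp a b < a.length) (h2 : pvLcp a b < b.length) :
    a[pvLcp a b]? ≠ b[pvLcp a b]? := by
  induction a generalizing b with
  | nil => simp at h1
  | cons x as ih =>
    cases b with
    | nil => simp at h2
    | cons y bs =>
      by_cases heq : x = y
      · have hl : pvLcp (x :: as) (y :: bs) = pvLcp as bs + 1 := by simp [pvLcp, heq]
        rw [hl]
        simp only [List.getElem?_cons_succ]
        exact ih (by rw [hl] at h1; simpa using h1) (by rw [hl] at h2; simpa using h2)
      · have hl : pvLcp (x :: as) (y :: bs) = 0 := by simp [pvLcp, heq]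
        rw [hl]
        simpa using heq

theorem pvLcp_take {a b : List Char} {k : Nat} (h1 : k ≤ a.length) (h2 : k ≤ b.length) :
    k ≤ pvLcp a b ↔ a.take k = b.take k := by
  induction a generalizing b k with
  | nil =>
    have : k = 0 := by simpa using h1
    subst this
    simp [pvLcp]
  | cons x as ih =>
    cases b with
    | nil =>
      have : k = 0 := by simpa using h2
      subst this
      simp [pvLcp]
    | cons y bs =>
      cases k with
      | zero => simp
      | succ k' =>
        simp only [pvLcp, List.take_succ_cons]
        split
        case isTrue heq =>
          subst heq
          rw [Nat.succ_le_succ_iff, ih (by simpa using h1) (by simpa using h2)]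
          simp
        case isFalse hne =>
          constructor
          · omega
          · intro hcontra
            simp at hcontra
            exact absurd hcontra.1 hne

theorem pvLe_lcp {a b : List Char} {k : Nat} (h1 : k ≤ a.length) (h2 : k ≤ b.length)
    (h : ∀ j < k, a[j]? = b[j]?) : k ≤ pvLcp a b := by
  rw [pvLcp_take h1 h2]
  apply List.ext_getElem?
  intro j
  by_cases hj : j < k
  · rw [List.getElem?_take_of_lt hj, List.getElem?_take_of_lt hj]
    exact h j hj
  · rw [List.getElem?_eq_none (l := a.take k) (by simp; omega),
        List.getElem?_eq_none (l := b.take k) (by simp; omega)]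

theorem pvZf_le (r : List Char) (i : Nat) : pvZf r i ≤ r.length - i := by
  have := pvLcp_le_right r (r.drop i)
  simpa [pvZf] using this

theorem pvZext_eq_aux (rl : List Char) (i : Nat) :
    ∀ (d k : Nat), pvZf rl i - k = d → k ≤ pvZf rl i →
    pvZext rl rl.length i k = pvZf rl i := by
  intro d
  induction d with
  | zero =>
    intro k hd hk
    have hke : k = pvZf rl i := by omega
    have hn := pvZf_le rl i
    rw [pvZext, dif_neg]
    · exact hke
    · rintro ⟨hlt, heq⟩
      have hk1 : k < rl.length - i := by omega
      have stop := pvLcp_stop (a := rl) (b := rl.drop i)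
        (by simp only [pvZf] at hke; omega)
        (by simp only [pvZf] at hke; simp only [List.length_drop]; omega)
      simp only [pvZf] at hke
      rw [← hke] at stop
      apply stop
      rw [List.getElem?_drop]
      have e1 : rl[k]? = some (rl.getD k ' ') := by
        rw [List.getD_eq_getElem?_getD, List.getElem?_eq_getElem (by omega)]
        simp
      have e2 : rl[i + k]? = some (rl.getD (i + k) ' ') := by
        rw [List.getD_eq_getElem?_getD, List.getElem?_eq_getElem (by omega)]
        simp
      rw [e1, e2, heq]
  | succ d' ih =>
    intro k hd hk
    have hn := pvZf_le rl i
    have hklt : k < pvZf rl i := by omega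
    have hmv : rl[k]? = rl[i + k]? := by
      have := pvLcp_getElem? (a := rl) (b := rl.drop i)
        (by simpa [pvZf] using hklt)
      rwa [List.getElem?_drop] at this
    rw [pvZext, dif_pos ⟨by omega, by
      rw [List.getD_eq_getElem?_getD, List.getD_eq_getElem?_getD, hmv]⟩]
    exact ih (k + 1) (by omega) (by omega)

theorem pvZext_eq (rl : List Char) (i k : Nat) (hk : k ≤ pvZf rl i) :
    pvZext rl rl.length i k = pvZf rl i :=
  pvZext_eq_aux rl i _ k rfl hk

-- the loop invariant of Source B's Z pass
def pvZInv (r : List Char) (i : Nat) (st : List Nat × Nat × Nat) : Prop :=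
  st.1.length = r.length ∧
  (∀ j, 1 ≤ j → j < i → st.1.getD j 0 = pvZf r j) ∧
  st.2.1 < i ∧
  st.2.2 ≤ st.2.1 + pvZf r st.2.1 ∧
  (st.2.1 = 0 → st.2.2 = 0)

theorem pvZstep_inv {r : List Char} {i : Nat} {st : List Nat × Nat × Nat}
    (hinv : pvZInv r i st) (hi : 1 ≤ i) (hin : i < r.length) :
    pvZInv r (i + 1) (pvZstep r r.length st i) := by
  obtain ⟨z, l, rt⟩ := st
  obtain ⟨hlen, hz, hl, hrt, hl0⟩ := hinv
  simp only at hlen hz hl hrt hl0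
  have hZl := pvZf_le r l
  have hZi := pvZf_le r i
  have hk0 : (if i < rt then min (rt - i) (z.getD (i - l) 0) else 0) ≤ pvZf r i := by
    split
    case isTrue hirt =>
      have hl1 : 1 ≤ l := by
        by_contra h
        have := hl0 (by omega)
        omega
      rw [hz (i - l) (by omega) (by omega)]
      have hZil := pvZf_le r (i - l)
      refine pvLe_lcp ?_ ?_ ?_
      · omega
      · simp only [List.length_drop]; omega
      · intro j hj
        rw [List.getElem?_drop]
        have hA : r[j]? = r[(i - l) + j]? := by
          have := pvLcp_getElem? (a := r) (b := r.drop (i - l)) (j := j)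
            (by simp only [pvZf] at hj ⊢; omega)
          rwa [List.getElem?_drop] at this
        have hB : r[(i - l) + j]? = r[l + ((i - l) + j)]? := by
          have := pvLcp_getElem? (a := r) (b := r.drop l) (j := (i - l) + j)
            (by simp only [pvZf] at hrt ⊢; omega)
          rwa [List.getElem?_drop] at this
        rw [hA, hB]
        congr 1
        omega
    case isFalse _ => omega
  simp only [pvZstep]
  rw [pvZext_eq r i _ hk0]
  have hset : ∀ j, 1 ≤ j → j < i + 1 →
      (z.set i (pvZf r i)).getD j 0 = pvZf r j := by
    intro j hj1 hj2
    rcases Nat.lt_or_ge j i with hji | hji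
    · rw [List.getD_eq_getElem?_getD, List.getElem?_set_ne (by omega),
        ← List.getD_eq_getElem?_getD]
      exact hz j hj1 hji
    · have hje : j = i := by omega
      subst hje
      rw [List.getD_eq_getElem?_getD, List.getElem?_set_self (by omega)]
      simp
  split
  case isTrue h =>
    refine ⟨by simpa using hlen, hset, ?_, ?_, ?_⟩
    · show i < i + 1
      omega
    · show i + pvZf r i ≤ i + pvZf r i
      omega
    · show i = 0 → i + pvZf r i = 0
      intro h0
      omega
  case isFalse h =>
    refine ⟨by simpa using hlen, hset, ?_, ?_, ?_⟩
    · show l < i + 1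
      omega
    · show rt ≤ l + pvZf r l
      exact hrt
    · show l = 0 → rt = 0
      exact hl0

theorem pvZfold_inv (r : List Char) :
    ∀ (m s : Nat) (st : List Nat × Nat × Nat), 1 ≤ s → s + m ≤ r.length → pvZInv r s st →
    pvZInv r (s + m) ((List.range' s m).foldl (pvZstep r r.length) st) := by
  intro m
  induction m with
  | zero => intro s st _ _ h; simpa using h
  | succ m' ih =>
    intro s st hs hsm h
    rw [List.range'_succ, List.foldl_cons]
    have := ih (s + 1) (pvZstep r r.length st s) (by omega) (by omega)
      (pvZstep_inv h hs (by omega))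
    rw [show s + (m' + 1) = s + 1 + m' by omega]
    exact this

-- final Z-table correctness: entry t holds the true Z-value, 1 ≤ t < n
theorem pvZtable (r : List Char) (t : Nat) (ht1 : 1 ≤ t) (ht2 : t < r.length) :
    (((List.range' 1 (r.length - 1)).foldl (pvZstep r r.length)
      (List.replicate r.length 0, 0, 0)).1).getD t 0 = pvZf r t := by
  have hinit : pvZInv r 1 (List.replicate r.length 0, 0, 0) := by
    refine ⟨by simp, by intro j h1 h2; omega, by simp, by simp, by simp⟩
  have := pvZfold_inv r (r.length - 1) 1 _ (by omega) (by omega) hinit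
  exact this.2.1 t ht1 (by omega)

theorem pvZtable' (cl : List Char) (t : Nat) (ht1 : 1 ≤ t) (ht2 : t < cl.length) :
    (((List.range' 1 (cl.length - 1)).foldl (pvZstep cl.reverse cl.length)
      (List.replicate cl.length 0, 0, 0)).1).getD t 0 = pvZf cl.reverse t := by
  have h := pvZtable cl.reverse t ht1 (by simpa using ht2)
  simpa using h

-- the doubled-tail test of A and the Z-value test of B agree
theorem pvCond (cl : List Char) (t : Nat) (h3 : 3 ≤ t) (h2 : 2 * t ≤ cl.length) :
    (cl.drop (cl.length - t) <:+ cl.take (cl.length - t)) ↔ t ≤ pvZf cl.reverse t := by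
  rw [pvZf, pvLcp_take (by simp; omega) (by simp; omega)]
  rw [← List.reverse_prefix, List.prefix_iff_eq_take]
  rw [List.reverse_drop, List.reverse_take]
  have e1 : cl.length - (cl.length - t) = t := by omega
  rw [e1]
  have e2 : (cl.reverse.take t).length = t := by simp; omega
  rw [e2]

theorem pvRange_eq (N : Nat) :
    PySem.List.pyRange 3 (PySem.Int.floordiv (N : Int) 2 + 1) 1 =
      (List.range' 3 (N / 2 + 1 - 3)).map (fun t : Nat => (t : Int)) := by
  have hf : PySem.Int.floordiv (N : Int) 2 = ((N / 2 : Nat) : Int) := by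
    simp [PySem.Int.floordiv, Int.fdiv_eq_ediv]
  rw [hf, PySem.List.pyRange_one, List.range'_eq_map_range, List.map_map]
  have hm : ((((N / 2 : Nat) : Int) + 1) - 3).toNat = N / 2 + 1 - 3 := by omega
  rw [hm]
  apply List.map_congr_left
  intro k _
  simp

theorem pvLoop_eq (tok : String) (z : List Nat) (N : Nat) (hN : N = tok.toList.length)
    (hz : ∀ t, 3 ≤ t → 2 * t ≤ N → z.getD t 0 = pvZf tok.toList.reverse t) :
    ∀ (ts : List Nat), (∀ t ∈ ts, 3 ≤ t ∧ 2 * t ≤ N) →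
    pvAloop tok (N : Int) (ts.map (fun t : Nat => (t : Int))) = pvBscan tok N z ts := by
  intro ts
  induction ts with
  | nil => intro _; simp [pvAloop, pvBscan]
  | cons t ts ih =>
    intro hts
    obtain ⟨ht3, ht2⟩ := hts t (by simp)
    simp only [List.map_cons, pvAloop, pvBscan]
    have hI : (N : Int) - (t : Int) = ((N - t : Nat) : Int) := by omega
    rw [hI]
    have hbase : (PySem.Str.slice tok none (some ((N - t : Nat) : Int))).toList =
        tok.toList.take (N - t) := by
      simp [PySem.List.slice_to_natCast]
    have htail : (PySem.Str.slice tok (some ((N - t : Nat) : Int)) none).toList =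
        tok.toList.drop (N - t) := by
      simp [PySem.List.slice_from_natCast]
    have hne : (PySem.Str.slice tok none (some ((N - t : Nat) : Int)) == "") = false := by
      rw [beq_eq_false_iff_ne]
      intro hc
      have hlz : (PySem.Str.slice tok none (some ((N - t : Nat) : Int))).toList.length = 0 := by
        rw [hc]
        rfl
      rw [hbase, List.length_take, ← hN] at hlz
      omega
    rw [hne]
    simp only [Bool.not_false, Bool.true_and]
    have hcond : (PySem.Str.endswith (PySem.Str.slice tok none (some ((N - t : Nat) : Int)))
        (PySem.Str.slice tok (some ((N - t : Nat) : Int)) none) = true) ↔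
        (t ≤ z.getD t 0) := by
      rw [hz t ht3 ht2]
      rw [show (PySem.Str.endswith (PySem.Str.slice tok none (some ((N - t : Nat) : Int)))
          (PySem.Str.slice tok (some ((N - t : Nat) : Int)) none) = true) ↔
          (tok.toList.drop (N - t) <:+ tok.toList.take (N - t)) by
        rw [PySem.Str.endswith_eq, PySem.Chars.endswith_iff, hbase, htail]]
      rw [hN] at ht2 ⊢
      exact pvCond tok.toList t ht3 ht2
    by_cases hc : t ≤ z.getD t 0
    · rw [if_pos (hcond.mpr hc), if_pos hc]
    · rw [if_neg fun h => hc (hcond.mp h), if_neg hc]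
      exact ih fun u hu => hts u (by simp [hu])

-- ===== VERDICT (by name: the statement is the Claim_ definition above) =====
theorem remove_suffix_echo_py_spec : Claim_equal_remove_suffix_echo_py := by
  intro tok _
  unfold Spec_remove_suffix_echo_py
  simp only [remove_suffix_echo_py, remove_suffix_echo_py_alt]
  have hlen : PySem.Str.len tok = (tok.toList.length : Int) := by simp
  rw [hlen, pvRange_eq tok.toList.length]
  apply pvLoop_eq tok _ tok.toList.length rfl
  · intro t h3 h2
    exact pvZtable' tok.toList t (by omega) (by omega)
  · intro t ht
    rw [List.mem_range'_1] at ht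
    omega
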